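-- pv_equiv track=rewrite | github.com/johnnvelo7/eit-2026-srm-analysis | scripts/3_generate_report.py | calculate_srm_intensity
-- ===== SOURCE A (Python) =====
-- from typing import Dict, List
--
-- SRM_CATEGORY_MAP = {
--     "Recycled aggregate": "construction",
--     "Reclaimed asphalt pavement (RAP)": "construction",
--     "Steel scrap": "metal",
--     "Recycled steel scrap": "metal",
--     "Aluminum scrap": "metal",
--     "Copper scrap": "metal",
--     "Nickel-bearing scrap": "metal",
--     "Cobalt-bearing scrap": "metal",
--     "Metal scrap": "metal",
--     "Recycled polymer pellets": "plastic",
--     "Sorted plastic waste": "plastic",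
--     "Recycled EPS": "plastic",
--     "Wood chips / fiber": "wood",
--     "Recovered timber": "wood",
--     "Biomass fuel": "biomass",
--     "Biomass pellets": "biomass",
--     "Bio-oils": "biomass",
--     "Biogas": "biogas",
--     "Digestate": "digestate",
--     "Digestate (biofertilizer)": "digestate"
-- }
--
-- def calculate_srm_intensity(srm_types: List[str], quantitative_data: str) -> Dict[str, int]:
--     """
--     Calculate SRM usage intensity for each category
--
--     Returns dict with intensity levels (0=none, 1=low, 2=medium-high, 3=core)
--     """
--     intensity = {
--         "construction": 0,
--         "metal": 0,
--         "plastic": 0,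
--         "wood": 0,
--         "biomass": 0,
--         "biogas": 0,
--         "digestate": 0
--     }
--
--     for srm in srm_types:
--         category = SRM_CATEGORY_MAP.get(srm)
--         if category:
--             # Simple heuristic: check quantitative data for intensity
--             if "100%" in quantitative_data or "Core" in quantitative_data:
--                 intensity[category] = max(intensity[category], 3)
--             elif any(x in quantitative_data for x in ["75%", "70%", "target", "high"]):
--                 intensity[category] = max(intensity[category], 2)
--             elif srm in quantitative_data or category in quantitative_data:
--                 intensity[category] = max(intensity[category], 2)
--             else:
--                 intensity[category] = max(intensity[category], 1)
--
--     return intensity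
-- ===== SOURCE B (Python) =====
-- from typing import Dict, List
--
-- SRM_CATEGORY_MAP = {
--     "Recycled aggregate": "construction",
--     "Reclaimed asphalt pavement (RAP)": "construction",
--     "Steel scrap": "metal",
--     "Recycled steel scrap": "metal",
--     "Aluminum scrap": "metal",
--     "Copper scrap": "metal",
--     "Nickel-bearing scrap": "metal",
--     "Cobalt-bearing scrap": "metal",
--     "Metal scrap": "metal",
--     "Recycled polymer pellets": "plastic",
--     "Sorted plastic waste": "plastic",
--     "Recycled EPS": "plastic",
--     "Wood chips / fiber": "wood",
--     "Recovered timber": "wood",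
--     "Biomass fuel": "biomass",
--     "Biomass pellets": "biomass",
--     "Bio-oils": "biomass",
--     "Biogas": "biogas",
--     "Digestate": "digestate",
--     "Digestate (biofertilizer)": "digestate"
-- }
--
-- CATEGORIES = ["construction", "metal", "plastic", "wood", "biomass", "biogas", "digestate"]
--
--
-- def calculate_srm_intensity(srm_types: List[str], quantitative_data: str) -> Dict[str, int]:
--     # The tier implied by the quantitative data is independent of the SRM list:
--     # compute it once instead of re-checking it for every SRM.
--     if "100%" in quantitative_data or "Core" in quantitative_data:
--         tier = 3
--     elif any(x in quantitative_data for x in ["75%", "70%", "target", "high"]):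
--         tier = 2
--     else:
--         tier = None
--
--     # Group the given SRM names by their category.
--     groups = {}
--     for srm in srm_types:
--         category = SRM_CATEGORY_MAP.get(srm)
--         if category:
--             groups.setdefault(category, []).append(srm)
--
--     # One pass over the seven categories.
--     result = {}
--     for category in CATEGORIES:
--         if category not in groups:
--             result[category] = 0
--         elif tier is not None:
--             result[category] = tier
--         elif category in quantitative_data or any(s in quantitative_data for s in groups[category]):
--             result[category] = 2
--         else:
--             result[category] = 1
--     return result
-- ===== Notes on version B (the rewrite author's own statement) =====
-- stated objective: alternative
-- what changed: Computes the data-driven tier once up front, groups the SRM names by category into a dict, and then assigns each of the seven categories its intensity in one pass over the categories, instead of scanning the raw SRM list with an inline 4-way branch and max-updates per element.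
import Mathlib
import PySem

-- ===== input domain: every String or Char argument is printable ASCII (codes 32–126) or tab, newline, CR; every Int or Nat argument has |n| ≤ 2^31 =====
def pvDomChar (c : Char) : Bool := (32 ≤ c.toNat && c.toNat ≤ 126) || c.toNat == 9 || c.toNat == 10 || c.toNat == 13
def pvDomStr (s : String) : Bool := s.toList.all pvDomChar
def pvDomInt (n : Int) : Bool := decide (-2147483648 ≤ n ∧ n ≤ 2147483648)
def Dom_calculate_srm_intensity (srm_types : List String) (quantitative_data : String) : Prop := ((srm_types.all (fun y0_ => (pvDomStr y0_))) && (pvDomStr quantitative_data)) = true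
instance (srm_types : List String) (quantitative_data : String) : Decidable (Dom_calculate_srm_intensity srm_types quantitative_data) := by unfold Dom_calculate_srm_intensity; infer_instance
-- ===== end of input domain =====

-- B computes the quantitative tier once and assigns intensities per category over a
-- grouping of the SRM names, instead of A's per-SRM scan with an inline 4-way branch
-- (objective: alternative decomposition; same results).


-- ===== PORT A =====
def pvSRM_CATEGORY_MAP : PySem.Dict String String := PySem.Dict.ofList
  [("Recycled aggregate", "construction"),
   ("Reclaimed asphalt pavement (RAP)", "construction"),
   ("Steel scrap", "metal"),
   ("Recycled steel scrap", "metal"),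
   ("Aluminum scrap", "metal"),
   ("Copper scrap", "metal"),
   ("Nickel-bearing scrap", "metal"),
   ("Cobalt-bearing scrap", "metal"),
   ("Metal scrap", "metal"),
   ("Recycled polymer pellets", "plastic"),
   ("Sorted plastic waste", "plastic"),
   ("Recycled EPS", "plastic"),
   ("Wood chips / fiber", "wood"),
   ("Recovered timber", "wood"),
   ("Biomass fuel", "biomass"),
   ("Biomass pellets", "biomass"),
   ("Bio-oils", "biomass"),
   ("Biogas", "biogas"),
   ("Digestate", "digestate"),
   ("Digestate (biofertilizer)", "digestate")]

-- loop body of A's 'for srm in srm_types'; 'if category:' = 'some category' (no map value is "",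
-- so Python's string-truthiness test is exactly the some-case); 'intensity[category]' is getD _ 0,
-- exact because every category in the map is a key of the initial intensity dict
def pvStepA (qd : String) (d : PySem.Dict String Int) (srm : String) : PySem.Dict String Int :=
  match pvSRM_CATEGORY_MAP.get? srm with
  | none => d
  | some category =>
      if PySem.Str.isIn "100%" qd || PySem.Str.isIn "Core" qd then
        d.insert category (max (d.getD category 0) 3)
      else if (["75%", "70%", "target", "high"].any fun x => PySem.Str.isIn x qd) then
        d.insert category (max (d.getD category 0) 2)
      else if PySem.Str.isIn srm qd || PySem.Str.isIn category qd then
        d.insert category (max (d.getD category 0) 2)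
      else
        d.insert category (max (d.getD category 0) 1)

def calculate_srm_intensity (srm_types : List String) (quantitative_data : String) : List (String × Int) :=
  (srm_types.foldl (pvStepA quantitative_data)
    (PySem.Dict.ofList [("construction", 0), ("metal", 0), ("plastic", 0), ("wood", 0),
                        ("biomass", 0), ("biogas", 0), ("digestate", 0)])).items

-- ===== PORT B =====
def pvCATEGORIES : List String :=
  ["construction", "metal", "plastic", "wood", "biomass", "biogas", "digestate"]

-- B's tier, computed once from the quantitative data
def pvTier (qd : String) : Option Int :=
  if PySem.Str.isIn "100%" qd || PySem.Str.isIn "Core" qd then some 3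
  else if (["75%", "70%", "target", "high"].any fun x => PySem.Str.isIn x qd) then some 2
  else none

-- B's grouping loop: groups.setdefault(category, []).append(srm)  =  modify category [] (· ++ [srm])
def pvGStep (d : PySem.Dict String (List String)) (srm : String) : PySem.Dict String (List String) :=
  match pvSRM_CATEGORY_MAP.get? srm with
  | none => d
  | some category => d.modify category [] (fun l => l ++ [srm])

def pvGroups (srm_types : List String) : PySem.Dict String (List String) :=
  srm_types.foldl pvGStep PySem.Dict.empty

-- body of B's 'for category in CATEGORIES' ('groups[category]' is getD _ [], exact since contains holds there)
def pvBVal (qd : String) (tier : Option Int) (groups : PySem.Dict String (List String))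
    (category : String) : Int :=
  if groups.contains category = false then 0
  else match tier with
    | some t => t
    | none =>
        if PySem.Str.isIn category qd
            || ((groups.getD category []).any fun s => PySem.Str.isIn s qd) then 2
        else 1

def calculate_srm_intensity_alt (srm_types : List String) (quantitative_data : String) : List (String × Int) :=
  let tier := pvTier quantitative_data
  let groups := pvGroups srm_types
  (pvCATEGORIES.foldl (fun res category => res.insert category (pvBVal quantitative_data tier groups category))
    PySem.Dict.empty).items

-- ===== PRECONDITION & SPEC =====
def Spec_calculate_srm_intensity (srm_types : List String) (quantitative_data : String) (out : List (String × Int)) : Prop := out = calculate_srm_intensity_alt srm_types quantitative_data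
instance (srm_types : List String) (quantitative_data : String) (out : List (String × Int)) : Decidable (Spec_calculate_srm_intensity srm_types quantitative_data out) := by unfold Spec_calculate_srm_intensity; infer_instance

-- ===== CLAIM (what is proved, stated in full; the proofs are below) =====
def Claim_equal_calculate_srm_intensity : Prop := ∀ (srm_types : List String) (quantitative_data : String), Dom_calculate_srm_intensity srm_types quantitative_data → Spec_calculate_srm_intensity srm_types quantitative_data (calculate_srm_intensity srm_types quantitative_data)

-- ===== LEMMAS AND PROOFS =====

-- the intensity level A assigns for one SRM of a given category
def pvLevel (qd srm category : String) : Int :=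
  if PySem.Str.isIn "100%" qd || PySem.Str.isIn "Core" qd then 3
  else if (["75%", "70%", "target", "high"].any fun x => PySem.Str.isIn x qd) then 2
  else if PySem.Str.isIn srm qd || PySem.Str.isIn category qd then 2
  else 1

-- the 7-key intensity dict with value f c at category c
def pvD (f : String → Int) : PySem.Dict String Int :=
  PySem.Dict.mk (pvCATEGORIES.map fun c => (c, f c))

-- A's accumulated value at category c after processing l, starting from a
def pvValF (qd : String) (l : List String) (c : String) (a : Int) : Int :=
  l.foldl (fun acc s =>
    match pvSRM_CATEGORY_MAP.get? s with
    | some c' => if c = c' then max acc (pvLevel qd s c') else acc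
    | none => acc) a

-- the SRM names of srm_types that belong to category c
def pvFilt (l : List String) (c : String) : List String :=
  l.filter fun s => pvSRM_CATEGORY_MAP.get? s == some c

lemma pv_cat_mem {s c : String} (h : pvSRM_CATEGORY_MAP.get? s = some c) : c ∈ pvCATEGORIES := by
  have h2 := PySem.Dict.mem_items_of_get?_eq_some (d := pvSRM_CATEGORY_MAP) (k := s) (v := c) h
  have h3 : (s, c) ∈ ([("Recycled aggregate", "construction"),
    ("Reclaimed asphalt pavement (RAP)", "construction"),
    ("Steel scrap", "metal"),
    ("Recycled steel scrap", "metal"),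
    ("Aluminum scrap", "metal"),
    ("Copper scrap", "metal"),
    ("Nickel-bearing scrap", "metal"),
    ("Cobalt-bearing scrap", "metal"),
    ("Metal scrap", "metal"),
    ("Recycled polymer pellets", "plastic"),
    ("Sorted plastic waste", "plastic"),
    ("Recycled EPS", "plastic"),
    ("Wood chips / fiber", "wood"),
    ("Recovered timber", "wood"),
    ("Biomass fuel", "biomass"),
    ("Biomass pellets", "biomass"),
    ("Bio-oils", "biomass"),
    ("Biogas", "biogas"),
    ("Digestate", "digestate"),
    ("Digestate (biofertilizer)", "digestate")] : List (String × String)) := h2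
  simp only [List.mem_cons, List.not_mem_nil, or_false, Prod.mk.injEq] at h3
  rcases h3 with ⟨_, rfl⟩ | ⟨_, rfl⟩ | ⟨_, rfl⟩ | ⟨_, rfl⟩ | ⟨_, rfl⟩ | ⟨_, rfl⟩ | ⟨_, rfl⟩ |
    ⟨_, rfl⟩ | ⟨_, rfl⟩ | ⟨_, rfl⟩ | ⟨_, rfl⟩ | ⟨_, rfl⟩ | ⟨_, rfl⟩ | ⟨_, rfl⟩ | ⟨_, rfl⟩ |
    ⟨_, rfl⟩ | ⟨_, rfl⟩ | ⟨_, rfl⟩ | ⟨_, rfl⟩ | ⟨_, rfl⟩ <;> decide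

lemma pv_getD_D (f : String → Int) {c : String} (hc : c ∈ pvCATEGORIES) :
    (pvD f).getD c 0 = f c := by
  fin_cases hc <;> rfl

lemma pv_insert_D (f : String → Int) {c₀ : String} (hc : c₀ ∈ pvCATEGORIES) (v : Int) :
    (pvD f).insert c₀ v = pvD (fun c => if c = c₀ then v else f c) := by
  fin_cases hc <;> rfl

lemma pv_stepA_D (qd : String) (f : String → Int) (s : String) :
    pvStepA qd (pvD f) s = pvD (fun c =>
      match pvSRM_CATEGORY_MAP.get? s with
      | some c' => if c = c' then max (f c) (pvLevel qd s c') else f c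
      | none => f c) := by
  cases h : pvSRM_CATEGORY_MAP.get? s with
  | none => simp [pvStepA, h]
  | some c0 =>
      have hc := pv_cat_mem h
      simp only [pvStepA, h]
      rw [pv_getD_D f hc]
      split_ifs with h1 h2 h3 <;>
        · rw [pv_insert_D f hc]
          apply congrArg pvD
          funext c
          by_cases hcc : c = c0 <;> simp [hcc, pvLevel] <;> simp_all

lemma pv_foldA_D (qd : String) : ∀ (l : List String) (f : String → Int),
    l.foldl (pvStepA qd) (pvD f) = pvD (fun c => pvValF qd l c (f c)) := by
  intro l
  induction l with
  | nil => intro f; simp [pvValF]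
  | cons s l ih =>
      intro f
      rw [List.foldl_cons, pv_stepA_D, ih]
      rfl

lemma pv_groups_getD : ∀ (l : List String) (d : PySem.Dict String (List String)) (c : String),
    (l.foldl pvGStep d).getD c [] = d.getD c [] ++ pvFilt l c := by
  intro l
  induction l with
  | nil => intro d c; simp [pvFilt]
  | cons s l ih =>
      intro d c
      rw [List.foldl_cons]
      cases h : pvSRM_CATEGORY_MAP.get? s with
      | none =>
          have hstep : pvGStep d s = d := by simp [pvGStep, h]
          rw [hstep, ih]
          simp [pvFilt, h]
      | some c0 =>
          have hstep : pvGStep d s = d.modify c0 [] (fun g => g ++ [s]) := by simp [pvGStep, h]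
          rw [hstep, ih, PySem.Dict.getD_modify]
          by_cases hcc : c = c0
          · subst hcc
            simp [pvFilt, h]
          · simp [pvFilt, h, hcc, Ne.symm hcc]

lemma pv_groups_contains : ∀ (l : List String) (d : PySem.Dict String (List String)) (c : String),
    (l.foldl pvGStep d).contains c = (d.contains c || !(pvFilt l c).isEmpty) := by
  intro l
  induction l with
  | nil => intro d c; simp [pvFilt]
  | cons s l ih =>
      intro d c
      rw [List.foldl_cons]
      cases h : pvSRM_CATEGORY_MAP.get? s with
      | none =>
          have hstep : pvGStep d s = d := by simp [pvGStep, h]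
          rw [hstep, ih]
          simp [pvFilt, h]
      | some c0 =>
          have hstep : pvGStep d s = d.modify c0 [] (fun g => g ++ [s]) := by simp [pvGStep, h]
          rw [hstep, ih, PySem.Dict.contains_modify]
          by_cases hcc : c = c0
          · subst hcc
            simp [pvFilt, h]
          · have hb : (c == c0) = false := by simp [hcc]
            simp [pvFilt, h, Ne.symm hcc, hb]

lemma pv_valF_filter (qd : String) (c : String) : ∀ (l : List String) (a : Int),
    pvValF qd l c a = ((pvFilt l c).map fun s => pvLevel qd s c).foldl max a := by
  intro l
  induction l with
  | nil => intro a; simp [pvValF, pvFilt]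
  | cons s l ih =>
      intro a
      cases h : pvSRM_CATEGORY_MAP.get? s with
      | none =>
          have : pvValF qd (s :: l) c a = pvValF qd l c a := by simp [pvValF, h]
          rw [this, ih]
          simp [pvFilt, h]
      | some c0 =>
          by_cases hcc : c = c0
          · subst hcc
            have : pvValF qd (s :: l) c a = pvValF qd l c (max a (pvLevel qd s c)) := by
              simp [pvValF, h]
            rw [this, ih]
            simp [pvFilt, h]
          · have : pvValF qd (s :: l) c a = pvValF qd l c a := by simp [pvValF, h, hcc]
            rw [this, ih]
            have hb : (pvSRM_CATEGORY_MAP.get? s == some c) = false := by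
              simp [h, Ne.symm hcc]
            simp [pvFilt, hb]

lemma pv_foldl_max_le (a : Int) : ∀ (L : List Int), (∀ x ∈ L, x ≤ a) → L.foldl max a = a := by
  intro L
  induction L generalizing a with
  | nil => intro _; rfl
  | cons x L ih =>
      intro h
      have hx : x ≤ a := h x (List.mem_cons_self ..)
      simp only [List.foldl_cons, max_eq_left hx]
      exact ih a (fun y hy => h y (List.mem_cons_of_mem _ hy))

lemma pv_foldl_max_const (k : Int) (hk : 0 ≤ k) (L : List Int) (h : ∀ x ∈ L, x = k) :
    L.foldl max 0 = if L = [] then 0 else k := by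
  cases L with
  | nil => rfl
  | cons x L =>
      have hx : x = k := h x (List.mem_cons_self ..)
      subst hx
      simp only [List.foldl_cons, max_eq_right hk, if_neg (List.cons_ne_nil _ _)]
      exact pv_foldl_max_le x L (fun y hy => le_of_eq (h y (List.mem_cons_of_mem _ hy)))

lemma pv_foldl_max_12 : ∀ (L : List Int), (∀ x ∈ L, x = 1 ∨ x = 2) →
    L.foldl max 0 = if (2:Int) ∈ L then 2 else if L = [] then 0 else 1 := by
  have aux : ∀ (L : List Int), (∀ x ∈ L, x = 1 ∨ x = 2) →
      L.foldl max 1 = if (2:Int) ∈ L then 2 else 1 := by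
    intro L
    induction L with
    | nil => intro _; rfl
    | cons x L ih =>
        intro h
        rcases h x (List.mem_cons_self ..) with rfl | rfl
        · simp only [List.foldl_cons, max_self]
          rw [ih (fun y hy => h y (List.mem_cons_of_mem _ hy))]
          simp
        · simp only [List.foldl_cons]
          rw [(by decide : max (1:Int) 2 = 2),
            pv_foldl_max_le 2 L (fun y hy => by
              rcases h y (List.mem_cons_of_mem _ hy) with rfl | rfl <;> decide)]
          simp
  intro L h
  cases L with
  | nil => rfl
  | cons x L =>
      rcases h x (List.mem_cons_self ..) with rfl | rfl
      · simp only [List.foldl_cons]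
        rw [(by decide : max (0:Int) 1 = 1), aux L (fun y hy => h y (List.mem_cons_of_mem _ hy))]
        simp [List.cons_ne_nil]
      · simp only [List.foldl_cons]
        rw [(by decide : max (0:Int) 2 = 2),
          pv_foldl_max_le 2 L (fun y hy => by
            rcases h y (List.mem_cons_of_mem _ hy) with rfl | rfl <;> decide)]
        simp

lemma pv_val_eq (qd : String) (l : List String) (c : String) :
    pvValF qd l c 0 = pvBVal qd (pvTier qd) (pvGroups l) c := by
  have hgc : (pvGroups l).contains c = !(pvFilt l c).isEmpty := by
    rw [pvGroups, pv_groups_contains]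
    simp
  have hgd : (pvGroups l).getD c [] = pvFilt l c := by
    rw [pvGroups, pv_groups_getD]
    simp
  rw [pv_valF_filter]
  unfold pvBVal pvTier
  rw [hgc, hgd]
  by_cases hf : pvFilt l c = []
  · simp [hf]
  · have hne : (!(pvFilt l c).isEmpty) = true := by simp [hf]
    rw [hne, if_neg (by simp : ¬ (true = false))]
    have hmf : (pvFilt l c).map (fun s => pvLevel qd s c) ≠ [] := by simp [hf]
    by_cases h1 : (PySem.Str.isIn "100%" qd || PySem.Str.isIn "Core" qd) = true
    · have hlv : ∀ x ∈ (pvFilt l c).map (fun s => pvLevel qd s c), x = 3 := by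
        intro x hx
        rcases List.mem_map.1 hx with ⟨s, _, rfl⟩
        unfold pvLevel
        rw [if_pos h1]
      rw [pv_foldl_max_const 3 (by decide) _ hlv, if_neg hmf, if_pos h1]
    · rw [if_neg h1]
      by_cases h2 : (["75%", "70%", "target", "high"].any fun x => PySem.Str.isIn x qd) = true
      · have hlv : ∀ x ∈ (pvFilt l c).map (fun s => pvLevel qd s c), x = 2 := by
          intro x hx
          rcases List.mem_map.1 hx with ⟨s, _, rfl⟩
          unfold pvLevel
          rw [if_neg h1, if_pos h2]
        rw [pv_foldl_max_const 2 (by decide) _ hlv, if_neg hmf, if_pos h2]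
      · rw [if_neg h2]
        show _ = if (PySem.Str.isIn c qd
              || ((pvFilt l c).any fun s => PySem.Str.isIn s qd)) = true then 2 else 1
        by_cases hcq : PySem.Str.isIn c qd = true
        · have hlv : ∀ x ∈ (pvFilt l c).map (fun s => pvLevel qd s c), x = 2 := by
            intro x hx
            rcases List.mem_map.1 hx with ⟨s, _, rfl⟩
            unfold pvLevel
            rw [if_neg h1, if_neg h2, if_pos (by rw [hcq, Bool.or_true])]
          rw [pv_foldl_max_const 2 (by decide) _ hlv, if_neg hmf,
            if_pos (by rw [hcq, Bool.true_or])]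
        · have hcqf : PySem.Str.isIn c qd = false := by
            revert hcq; cases PySem.Str.isIn c qd <;> simp
          have hlv : ∀ x ∈ (pvFilt l c).map (fun s => pvLevel qd s c), x = 1 ∨ x = 2 := by
            intro x hx
            rcases List.mem_map.1 hx with ⟨s, _, rfl⟩
            unfold pvLevel
            rw [if_neg h1, if_neg h2]
            split_ifs <;> simp
          rw [pv_foldl_max_12 _ hlv]
          have hmem : ((2:Int) ∈ (pvFilt l c).map fun s => pvLevel qd s c) ↔
              ((pvFilt l c).any fun s => PySem.Str.isIn s qd) = true := by
            rw [List.any_eq_true]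
            constructor
            · intro hm
              rcases List.mem_map.1 hm with ⟨s, hs, hlvs⟩
              refine ⟨s, hs, ?_⟩
              by_cases hin : PySem.Str.isIn s qd = true
              · exact hin
              · exfalso
                unfold pvLevel at hlvs
                rw [if_neg h1, if_neg h2, if_neg (by
                  intro hor
                  rcases Bool.or_eq_true_iff.1 hor with hh | hh
                  · exact hin hh
                  · rw [hcqf] at hh; cases hh)] at hlvs
                exact absurd hlvs (by decide)
            · intro hm
              rcases hm with ⟨s, hs, hin⟩
              refine List.mem_map.2 ⟨s, hs, ?_⟩
              unfold pvLevel
              rw [if_neg h1, if_neg h2, if_pos (by rw [hin, Bool.true_or])]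
          by_cases hany : ((pvFilt l c).any fun s => PySem.Str.isIn s qd) = true
          · rw [if_pos (hmem.2 hany), if_pos (by rw [hcqf, Bool.false_or]; exact hany)]
          · have hanyf : ((pvFilt l c).any fun s => PySem.Str.isIn s qd) = false := by
              revert hany; cases ((pvFilt l c).any fun s => PySem.Str.isIn s qd) <;> simp
            rw [if_neg (fun hm => hany (hmem.1 hm)), if_neg (by simp [hf]),
              if_neg (by rw [hcqf, Bool.false_or, hanyf]; simp)]

-- ===== VERDICT (by name: the statement is the Claim_ definition above) =====
theorem calculate_srm_intensity_spec : Claim_equal_calculate_srm_intensity := by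
  intro srm_types qd _
  unfold Spec_calculate_srm_intensity calculate_srm_intensity calculate_srm_intensity_alt
  have hinit : PySem.Dict.ofList
      [("construction", (0:Int)), ("metal", 0), ("plastic", 0), ("wood", 0),
       ("biomass", 0), ("biogas", 0), ("digestate", 0)] = pvD (fun _ => 0) := by decide
  rw [hinit, pv_foldA_D]
  have hB := PySem.Dict.items_foldl_insert_fresh (l := pvCATEGORIES) (k := fun c => c)
      (v := fun c => pvBVal qd (pvTier qd) (pvGroups srm_types) c) PySem.Dict.empty
      (by intro a _; simp) (by decide)
  simp only at hB
  rw [hB]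
  rw [show (PySem.Dict.empty : PySem.Dict String Int).items = [] from rfl,
    List.nil_append]
  show (pvCATEGORIES.map fun c => (c, pvValF qd srm_types c 0)) = _
  apply List.map_congr_left
  intro c _
  rw [pv_val_eq]
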